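-- pv_equiv track=rewrite | github.com/JacNal/Learning-objective-analysis | app/content_support.py | term_is_supported
-- ===== SOURCE A (Python) =====
-- def term_is_supported(objective_term: str, course_terms: set[str]) -> bool:
--     if objective_term in course_terms:
--         return True
--
--     objective_parts = set(objective_term.split())
--
--     for course_term in course_terms:
--         course_parts = set(course_term.split())
--         if objective_parts & course_parts:
--             return True
--
--     return False
-- ===== SOURCE B (Python) =====
-- def term_is_supported(objective_term: str, course_terms: set[str]) -> bool:
--     if objective_term in course_terms:
--         return True
--     a = sorted(set(objective_term.split()))
--     b = sorted({w for t in course_terms for w in t.split()})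
--     i, j = 0, 0
--     while i < len(a) and j < len(b):
--         if a[i] == b[j]:
--             return True
--         if a[i] < b[j]:
--             i += 1
--         else:
--             j += 1
--     return False
-- ===== Notes on version B (the rewrite author's own statement) =====
-- stated objective: alternative
-- what changed: Replaces A's per-term hash-set intersection loop with sort-then-merge: both vocabularies (objective words, pooled course words) are deduplicated and sorted, then a single two-pointer merge scan detects a common word.
import Mathlib
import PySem

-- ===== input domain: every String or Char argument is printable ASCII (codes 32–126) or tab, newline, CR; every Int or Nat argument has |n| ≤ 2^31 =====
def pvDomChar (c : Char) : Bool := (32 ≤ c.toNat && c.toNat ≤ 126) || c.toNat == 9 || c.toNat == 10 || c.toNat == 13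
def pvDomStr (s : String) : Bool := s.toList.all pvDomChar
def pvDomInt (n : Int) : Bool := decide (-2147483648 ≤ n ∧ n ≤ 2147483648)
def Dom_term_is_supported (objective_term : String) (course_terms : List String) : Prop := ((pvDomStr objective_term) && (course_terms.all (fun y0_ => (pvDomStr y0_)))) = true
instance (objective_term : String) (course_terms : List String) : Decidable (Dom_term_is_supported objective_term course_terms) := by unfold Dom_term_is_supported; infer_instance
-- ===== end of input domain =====

-- B replaces A's per-term hash-set intersection loop by sort-then-merge: both
-- vocabularies are deduplicated and sorted, then one two-pointer merge scan
-- looks for a common word (objective: alternative algorithm, similar cost).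

-- ===== PORT A =====
-- A's for-loop with early return, as structural recursion over the course terms.
def tisLoopA (objective_parts : PySem.Set String) : List String → Bool
  | [] => false
  | course_term :: rest =>
    let course_parts := PySem.Set.ofList (PySem.Str.split₀ course_term)
    if (PySem.Set.inter objective_parts course_parts).isEmpty then
      tisLoopA objective_parts rest
    else true

def term_is_supported (objective_term : String) (course_terms : List String) : Bool :=
  if PySem.Set.contains course_terms objective_term then true
  else
    let objective_parts := PySem.Set.ofList (PySem.Str.split₀ objective_term)
    tisLoopA objective_parts course_terms

-- ===== PORT B =====
-- B's while-loop: two-pointer merge over the two sorted word lists a and b.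
def tisMerge (a b : List String) (i j : Nat) : Bool :=
  if h : i < a.length ∧ j < b.length then
    if a[i]'h.1 = b[j]'h.2 then true
    else if a[i]'h.1 < b[j]'h.2 then tisMerge a b (i + 1) j
    else tisMerge a b i (j + 1)
  else false
termination_by (a.length - i) + (b.length - j)
decreasing_by all_goals omega

def term_is_supported_alt (objective_term : String) (course_terms : List String) : Bool :=
  if PySem.Set.contains course_terms objective_term then true
  else
    let a := PySem.List.sorted (PySem.Set.ofList (PySem.Str.split₀ objective_term)) (fun x => x) false
    let b := PySem.List.sorted
      (PySem.Set.ofList (course_terms.flatMap (fun t => PySem.Str.split₀ t))) (fun x => x) false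
    tisMerge a b 0 0

-- ===== PRECONDITION & SPEC =====
def Spec_term_is_supported (objective_term : String) (course_terms : List String) (out : Bool) : Prop := out = term_is_supported_alt objective_term course_terms
instance (objective_term : String) (course_terms : List String) (out : Bool) : Decidable (Spec_term_is_supported objective_term course_terms out) := by unfold Spec_term_is_supported; infer_instance

-- ===== CLAIM (what is proved, stated in full; the proofs are below) =====
def Claim_equal_term_is_supported : Prop := ∀ (objective_term : String) (course_terms : List String), Dom_term_is_supported objective_term course_terms → Spec_term_is_supported objective_term course_terms (term_is_supported objective_term course_terms)

-- ===== LEMMAS AND PROOFS =====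

theorem tisLoopA_iff (op : PySem.Set String) (cts : List String) :
    tisLoopA op cts = true ↔ ∃ c ∈ cts, ∃ w ∈ op, w ∈ PySem.Str.split₀ c := by
  induction cts with
  | nil => simp [tisLoopA]
  | cons c rest ih =>
    simp only [tisLoopA, List.mem_cons]
    by_cases h : (PySem.Set.inter op (PySem.Set.ofList (PySem.Str.split₀ c))).isEmpty = true
    · rw [if_pos h, ih]
      have hempty : ∀ w, ¬ (w ∈ op ∧ w ∈ PySem.Str.split₀ c) := by
        intro w hw
        have : w ∈ PySem.Set.inter op (PySem.Set.ofList (PySem.Str.split₀ c)) := by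
          rw [PySem.Set.mem_inter, PySem.Set.mem_ofList]; exact hw
        rw [List.isEmpty_iff] at h
        simp [h] at this
      constructor
      · rintro ⟨x, hx, hw⟩; exact ⟨x, Or.inr hx, hw⟩
      · rintro ⟨x, hx | hx, w, hw1, hw2⟩
        · exact absurd ⟨hw1, hx ▸ hw2⟩ (hempty w)
        · exact ⟨x, hx, w, hw1, hw2⟩
    · rw [if_neg h]
      simp only [true_iff]
      rw [List.isEmpty_iff] at h
      obtain ⟨w, hw⟩ := List.exists_mem_of_ne_nil _ h
      rw [PySem.Set.mem_inter, PySem.Set.mem_ofList] at hw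
      exact ⟨c, Or.inl rfl, w, hw.1, hw.2⟩

-- The two-pointer merge on strictly sorted lists finds exactly the common elements
-- of the remaining suffixes.
theorem tisMerge_iff (a b : List String)
    (ha : a.Pairwise (· < ·)) (hb : b.Pairwise (· < ·)) (i j : Nat) :
    tisMerge a b i j = true ↔ ∃ w, w ∈ a.drop i ∧ w ∈ b.drop j := by
  induction i, j using tisMerge.induct a b with
  | case1 i j h heq =>
    rw [tisMerge, dif_pos h, if_pos heq]
    simp only [true_iff]
    refine ⟨a[i]'h.1, ?_, ?_⟩
    · rw [List.drop_eq_getElem_cons h.1]; exact List.mem_cons_self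
    · rw [List.drop_eq_getElem_cons h.2, heq]; exact List.mem_cons_self
  | case2 i j h heq hlt ih =>
    rw [tisMerge, dif_pos h, if_neg heq, if_pos hlt, ih]
    have hdb : b.drop j = b[j]'h.2 :: b.drop (j + 1) := List.drop_eq_getElem_cons h.2
    have hda : a.drop i = a[i]'h.1 :: a.drop (i + 1) := List.drop_eq_getElem_cons h.1
    constructor
    · rintro ⟨w, hw1, hw2⟩
      exact ⟨w, by rw [hda]; exact List.mem_cons_of_mem _ hw1, hw2⟩
    · rintro ⟨w, hw1, hw2⟩
      rw [hda] at hw1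
      rcases List.mem_cons.mp hw1 with rfl | hw1'
      · -- w = a[i] < b[j], but w ∈ b.drop j forces b[j] ≤ w: contradiction
        rw [hdb] at hw2
        rcases List.mem_cons.mp hw2 with hwe | hw2'
        · exact absurd hlt (by rw [hwe]; exact lt_irrefl _)
        · have : b[j]'h.2 < a[i]'h.1 := by
            have := (List.pairwise_cons.mp (hdb ▸ hb.drop (i := j))).1
            exact this _ hw2'
          exact absurd (hlt.trans this) (lt_irrefl _)
      · exact ⟨w, hw1', hw2⟩
  | case3 i j h heq hlt ih =>
    rw [tisMerge, dif_pos h, if_neg heq, if_neg hlt, ih]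
    have hdb : b.drop j = b[j]'h.2 :: b.drop (j + 1) := List.drop_eq_getElem_cons h.2
    have hda : a.drop i = a[i]'h.1 :: a.drop (i + 1) := List.drop_eq_getElem_cons h.1
    have hgt : b[j]'h.2 < a[i]'h.1 := by
      rcases lt_trichotomy (a[i]'h.1) (b[j]'h.2) with hc | hc | hc
      · exact absurd hc hlt
      · exact absurd hc heq
      · exact hc
    constructor
    · rintro ⟨w, hw1, hw2⟩
      exact ⟨w, hw1, by rw [hdb]; exact List.mem_cons_of_mem _ hw2⟩
    · rintro ⟨w, hw1, hw2⟩
      rw [hdb] at hw2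
      rcases List.mem_cons.mp hw2 with rfl | hw2'
      · rw [hda] at hw1
        rcases List.mem_cons.mp hw1 with hwe | hw1'
        · exact absurd hgt (by rw [hwe]; exact lt_irrefl _)
        · have : a[i]'h.1 < b[j]'h.2 := by
            have := (List.pairwise_cons.mp (hda ▸ ha.drop (i := i))).1
            exact this _ hw1'
          exact absurd (hgt.trans this) (lt_irrefl _)
      · exact ⟨w, hw1, hw2'⟩
  | case4 i j h =>
    rw [tisMerge, dif_neg h]
    simp only [Bool.false_eq_true, false_iff]
    rintro ⟨w, hw1, hw2⟩
    rcases not_and_or.mp h with h1 | h1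
    · rw [List.drop_eq_nil_of_le (by omega)] at hw1; exact absurd hw1 (List.not_mem_nil)
    · rw [List.drop_eq_nil_of_le (by omega)] at hw2; exact absurd hw2 (List.not_mem_nil)

-- ===== VERDICT (by name: the statement is the Claim_ definition above) =====
theorem term_is_supported_spec : Claim_equal_term_is_supported := by
  intro o cts _
  unfold Spec_term_is_supported term_is_supported term_is_supported_alt
  by_cases h : PySem.Set.contains cts o = true
  · rw [if_pos h, if_pos h]
  · rw [if_neg h, if_neg h]
    rw [Bool.eq_iff_iff, tisLoopA_iff,
      tisMerge_iff _ _ (PySem.List.sorted_ofList_pairwise_lt _)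
        (PySem.List.sorted_ofList_pairwise_lt _) 0 0]
    simp only [List.drop_zero, PySem.List.mem_sorted, PySem.Set.mem_ofList, List.mem_flatMap]
    constructor
    · rintro ⟨c, hc, w, hw1, hw2⟩
      exact ⟨w, hw1, c, hc, hw2⟩
    · rintro ⟨w, hw1, c, hc, hw2⟩
      exact ⟨c, hc, w, hw1, hw2⟩
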